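-- pv_equiv track=rewrite | github.com/srana6/interview-prep | ctci/palindrome-permutation.py | _buildCharEvenFrequency
-- ===== SOURCE A (Python) =====
-- def _buildCharEvenFrequency(phrase):
-- 	hash_table = {}
-- 	letter = None
-- 	for i in range(len(phrase)):
-- 		letter = phrase[i]
-- 		if letter != ' ':
-- 			hash_table[letter] = not hash_table.get(letter, True)
-- 	return hash_table
-- ===== SOURCE B (Python) =====
-- def _buildCharEvenFrequency(phrase):
-- 	# Count-then-reduce: tally full counts of every non-space character in one pass,
-- 	# then derive the even-parity booleans from the counts in a second pass.
-- 	counts = {}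
-- 	for c in phrase:
-- 		if c != ' ':
-- 			counts[c] = counts.get(c, 0) + 1
-- 	return {c: n % 2 == 0 for c, n in counts.items()}
-- ===== Notes on version B (the rewrite author's own statement) =====
-- stated objective: idiomatic
-- what changed: Replaces the per-occurrence boolean parity toggle into the result dict with a count-then-reduce decomposition: one pass tallies integer counts of non-space characters, a second pass maps each count to n % 2 == 0.
import Mathlib
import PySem

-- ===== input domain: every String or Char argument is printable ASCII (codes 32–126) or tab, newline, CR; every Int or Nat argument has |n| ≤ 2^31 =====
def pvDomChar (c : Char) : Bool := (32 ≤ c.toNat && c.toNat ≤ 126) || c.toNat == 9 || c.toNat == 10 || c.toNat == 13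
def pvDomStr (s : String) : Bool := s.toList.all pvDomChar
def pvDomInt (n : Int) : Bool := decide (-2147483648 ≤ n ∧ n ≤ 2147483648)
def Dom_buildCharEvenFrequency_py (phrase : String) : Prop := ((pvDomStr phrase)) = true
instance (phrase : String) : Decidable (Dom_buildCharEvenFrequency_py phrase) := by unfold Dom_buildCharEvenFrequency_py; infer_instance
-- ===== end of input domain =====

-- B replaces A's per-occurrence parity toggle with a count-then-reduce decomposition (same O(n) cost; objective: idiomatic).

-- ===== PORT A =====
def buildCharEvenFrequency_py (phrase : String) : List (String × Bool) :=
  ((PySem.List.pyRange 0 (PySem.Str.len phrase) 1).foldl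
    (fun (d : PySem.Dict String Bool) i =>
      let letter := (PySem.List.pyGetD phrase.toList i ' ').toString
      if letter ≠ " " then d.insert letter (!(d.getD letter true)) else d)
    PySem.Dict.empty).items

-- ===== PORT B =====
def buildCharEvenFrequency_py_alt (phrase : String) : List (String × Bool) :=
  let counts : PySem.Dict String Int :=
    phrase.toList.foldl
      (fun d c => if c.toString ≠ " " then d.modify c.toString 0 (· + 1) else d)
      PySem.Dict.empty
  counts.items.map (fun p => (p.1, PySem.Int.mod p.2 2 == 0))

-- ===== PRECONDITION & SPEC =====
def Spec_buildCharEvenFrequency_py (phrase : String) (out : List (String × Bool)) : Prop := out = buildCharEvenFrequency_py_alt phrase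
instance (phrase : String) (out : List (String × Bool)) : Decidable (Spec_buildCharEvenFrequency_py phrase out) := by unfold Spec_buildCharEvenFrequency_py; infer_instance

-- ===== CLAIM (what is proved, stated in full; the proofs are below) =====
def Claim_equal_buildCharEvenFrequency_py : Prop := ∀ (phrase : String), Dom_buildCharEvenFrequency_py phrase → Spec_buildCharEvenFrequency_py phrase (buildCharEvenFrequency_py phrase)

-- ===== LEMMAS AND PROOFS =====

-- A loop guarded by 'if q x' is the loop over the filtered list.
theorem pv_foldl_if_filter {α β : Type} (q : α → Prop) [DecidablePred q]
    (f : β → α → β) (l : List α) (init : β) :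
    l.foldl (fun d x => if q x then f d x else d) init
      = (l.filter (fun x => decide (q x))).foldl f init := by
  induction l generalizing init with
  | nil => rfl
  | cons x xs ih => by_cases h : q x <;> simp [h, ih]

-- A's toggle loop: the stored flag is the initial flag xor-ed with the occurrence parity.
theorem pv_toggle_getD (ms : List String) (d : PySem.Dict String Bool) (v : String) :
    (ms.foldl (fun d k => d.insert k (!(d.getD k true))) d).getD v true
      = xor (d.getD v true) (decide (ms.count v % 2 = 1)) := by
  induction ms generalizing d with
  | nil => simp
  | cons x xs ih =>
    simp only [List.foldl_cons, ih, List.count_cons]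
    by_cases h : v = x
    · subst h
      rw [PySem.Dict.getD_insert_self]
      rcases Nat.mod_two_eq_zero_or_one (xs.count v) with h2 | h2 <;>
        simp [Nat.add_mod, h2]
    · simp [PySem.Dict.getD_insert, h, Ne.symm h]

theorem pv_toggle_keys (ms : List String) :
    (ms.foldl (fun d k => d.insert k (!(d.getD k true))) PySem.Dict.empty).keys
      = PySem.Set.ofList ms := by
  rw [PySem.Dict.keys_foldl_insert]
  simp [PySem.Dict.keys, PySem.Dict.empty, PySem.Set.update_nil_left]

-- parity of a count, as A computes it vs as B computes it
theorem pv_parity_eq (c : Nat) :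
    (!(decide (c % 2 = 1))) = (PySem.Int.mod (c : Int) 2 == 0) := by
  rcases Nat.mod_two_eq_zero_or_one c with h | h <;> simp [h] <;> omega

theorem pv_main (l : List Char) :
    (l.foldl (fun (d : PySem.Dict String Bool) c =>
        if c.toString ≠ " " then d.insert c.toString (!(d.getD c.toString true)) else d)
      PySem.Dict.empty).items
    = ((l.foldl (fun (d : PySem.Dict String Int) c =>
          if c.toString ≠ " " then d.modify c.toString 0 (· + 1) else d)
        PySem.Dict.empty).items).map (fun p => (p.1, PySem.Int.mod p.2 2 == 0)) := by
  rw [pv_foldl_if_filter (fun c : Char => c.toString ≠ " ")]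
  rw [pv_foldl_if_filter (fun c : Char => c.toString ≠ " ")]
  rw [← List.foldl_map (f := Char.toString)
      (g := fun (d : PySem.Dict String Bool) k => d.insert k (!(d.getD k true)))]
  rw [← List.foldl_map (f := Char.toString)
      (g := fun (d : PySem.Dict String Int) k => d.modify k 0 (· + 1))]
  rw [← PySem.Dict.counter_eq_foldl, PySem.Dict.items_counter]
  rw [PySem.Dict.items_eq_map_keys _ (PySem.Dict.nodup_keys_foldl_insert _ _ _ (by simp)) true]
  rw [pv_toggle_keys]
  rw [List.map_map]
  refine List.map_congr_left (fun k _ => ?_)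
  simp [pv_toggle_getD, pv_parity_eq]

-- ===== VERDICT (by name: the statement is the Claim_ definition above) =====
theorem buildCharEvenFrequency_py_spec : Claim_equal_buildCharEvenFrequency_py := by
  intro phrase _
  unfold Spec_buildCharEvenFrequency_py buildCharEvenFrequency_py buildCharEvenFrequency_py_alt
  simp only [PySem.Str.len_eq]
  rw [PySem.List.foldl_pyRange_zero_pyGetD' phrase.toList ' '
      (fun (d : PySem.Dict String Bool) c =>
        if c.toString ≠ " " then d.insert c.toString (!(d.getD c.toString true)) else d)
      PySem.Dict.empty]
  exact pv_main phrase.toList
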